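-- pv_equiv track=rewrite | github.com/ShinDohee/Python-Structures | Day1001/scoville.py | solution
-- ===== SOURCE A (Python) =====
-- import heapq
--
-- def solution(scoville, K):
--     answer = 0
--     heapq.heapify(scoville)
--     while True:
--         min1 = heapq.heappop(scoville)
--         if min1 >= K:
--             break
--         elif len(scoville) == 0:
--             answer = -1
--             break;
--
--         min2 = heapq.heappop(scoville)
--         X = min1 + 2 * min2
--         heapq.heappush(scoville, X)
--         answer += 1
--
--     return answer
-- ===== SOURCE B (Python) =====
-- from collections import deque
--
-- def _pop_smaller(orig, merged):
--     # remove and return the smaller of the two queue fronts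
--     # (IndexError when both queues are empty, as in the original)
--     if merged and (not orig or merged[0] < orig[0]):
--         return merged.popleft()
--     return orig.popleft()
--
-- def solution(scoville, K):
--     # two-queue trick: sort the input once; merged values come out in the order
--     # they are produced and (given how merging picks the two current minima)
--     # that order is nondecreasing, so a plain FIFO queue of merged values plus
--     # the sorted originals replaces the heap: each minimum is the smaller of
--     # the two queue fronts, no per-step push-down or insertion at all.
--     orig = deque(sorted(scoville))
--     merged = deque()
--     answer = 0
--     while True:
--         m1 = _pop_smaller(orig, merged)
--         if m1 >= K:
--             return answer
--         if not orig and not merged: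
--             return -1
--         m2 = _pop_smaller(orig, merged)
--         merged.append(m1 + 2 * m2)
--         answer += 1
-- ===== Notes on version B (the rewrite author's own statement) =====
-- stated objective: faster
-- what changed: replaces the heap by the two-queue trick: sort the input once, keep merged values in a plain FIFO queue (they are produced in nondecreasing order), and take each minimum as the smaller of the two queue fronts, eliminating all heap push-down/insertion work
import Mathlib
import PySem

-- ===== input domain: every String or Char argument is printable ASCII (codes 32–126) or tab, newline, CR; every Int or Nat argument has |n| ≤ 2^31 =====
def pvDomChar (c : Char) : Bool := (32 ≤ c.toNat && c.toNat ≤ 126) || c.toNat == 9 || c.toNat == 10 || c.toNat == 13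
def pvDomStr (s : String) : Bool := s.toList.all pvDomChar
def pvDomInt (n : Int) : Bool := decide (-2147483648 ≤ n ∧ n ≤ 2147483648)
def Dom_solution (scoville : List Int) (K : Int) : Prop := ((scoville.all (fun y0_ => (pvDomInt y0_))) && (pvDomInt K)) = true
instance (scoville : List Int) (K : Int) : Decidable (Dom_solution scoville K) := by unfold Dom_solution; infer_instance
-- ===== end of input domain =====

-- B replaces the heap by the two-queue trick (sort once; merged values go into a
-- FIFO queue; each minimum is the smaller of the two fronts) — measurably faster
-- by a constant factor. Return values only: A heapifies its argument in place,
-- B leaves the caller's list untouched.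

-- ===== PORT A =====
-- heapq is a C builtin; it is ported here by its exact observable semantics:
-- heappop removes and returns the smallest element (with duplicates, which equal
-- copy is removed cannot affect any value solution computes), heappush adds the
-- element, heapify permutes in place (identity on the list's contents). On the
-- empty heap heappop raises IndexError; that input is excluded by Pre_solution
-- (the port returns the leftover `answer` there).

theorem pv_minGetD_mem (h : List Int) (hne : h ≠ []) : h.min?.getD 0 ∈ h := by
  cases hm : h.min? with
  | none => exact absurd (List.min?_eq_none_iff.mp hm) hne
  | some m => simpa using List.min?_mem hm

def solutionGo (h : List Int) (K : Int) (ans : Int) : Int :=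
  if hh : h = [] then ans                       -- heappop of the empty heap: IndexError (outside Pre_)
  else
    let m1 := h.min?.getD 0                     -- min1 = heapq.heappop(scoville)
    if m1 ≥ K then ans                          -- break
    else
      let h1 := h.erase m1
      if hh1 : h1 = [] then -1                  -- len(scoville) == 0: answer = -1; break
      else
        let m2 := h1.min?.getD 0                -- min2 = heapq.heappop(scoville)
        solutionGo (h1.erase m2 ++ [m1 + 2 * m2]) K (ans + 1)  -- heappush X; answer += 1
termination_by h.length
decreasing_by
  have h1m : h.min?.getD 0 ∈ h := pv_minGetD_mem h hh
  have h2m : (h.erase (h.min?.getD 0)).min?.getD 0 ∈ h.erase (h.min?.getD 0) :=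
    pv_minGetD_mem _ hh1
  have e1 := List.length_erase_of_mem h1m
  have e2 := List.length_erase_of_mem h2m
  have hp : 0 < h.length := List.length_pos_of_ne_nil hh
  have hp1 : 0 < (h.erase (h.min?.getD 0)).length := List.length_pos_of_ne_nil hh1
  simp only [List.length_append, List.length_cons, List.length_nil, e2, e1]
  omega

def solution (scoville : List Int) (K : Int) : Int :=
  solutionGo scoville K 0                       -- answer = 0; heapify(scoville); while True: …

-- ===== PORT B =====
-- _pop_smaller(orig, merged): remove and return the smaller of the two fronts;
-- result is (value, orig', merged').  Both queues empty = IndexError (outside Pre_).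
def popSmaller (o q : List Int) : Int × List Int × List Int :=
  match q, o with
  | x :: qt, [] => (x, [], qt)                  -- merged nonempty, orig empty: merged.popleft()
  | x :: qt, y :: ot => if x < y then (x, y :: ot, qt) else (y, ot, x :: qt)
  | [], y :: ot => (y, ot, [])                  -- orig.popleft()
  | [], [] => (0, [], [])                       -- IndexError in Python (outside Pre_)

theorem popSmaller_len (o q : List Int) (h : ¬(o = [] ∧ q = [])) :
    (popSmaller o q).2.1.length + (popSmaller o q).2.2.length + 1 = o.length + q.length := by
  match q, o with
  | x :: qt, [] => simp [popSmaller]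
  | x :: qt, y :: ot => simp only [popSmaller]; split <;> simp <;> omega
  | [], y :: ot => simp [popSmaller]
  | [], [] => exact absurd ⟨rfl, rfl⟩ h

-- the while-loop of Source B over the state (orig, merged, answer)
def bGo (o q : List Int) (K ans : Int) : Int :=
  if he : o = [] ∧ q = [] then ans              -- _pop_smaller raises IndexError (outside Pre_)
  else
    let m1 := (popSmaller o q).1                -- m1 = _pop_smaller(orig, merged)
    let o1 := (popSmaller o q).2.1
    let q1 := (popSmaller o q).2.2
    if m1 ≥ K then ans                          -- return answer
    else if o1 = [] ∧ q1 = [] then -1           -- if not orig and not merged: return -1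
    else                                        -- m2 = _pop_smaller(…); merged.append(m1+2*m2)
      bGo (popSmaller o1 q1).2.1
          ((popSmaller o1 q1).2.2 ++ [m1 + 2 * (popSmaller o1 q1).1]) K (ans + 1)
termination_by o.length + q.length
decreasing_by
  rename_i h1 h2
  have e1 := popSmaller_len o q he
  have e2 := popSmaller_len (popSmaller o q).2.1 (popSmaller o q).2.2 h2
  simp only [List.length_append, List.length_cons, List.length_nil]
  omega

def solution_alt (scoville : List Int) (K : Int) : Int :=
  bGo (PySem.List.sorted scoville (fun x => x) false) [] K 0   -- orig = deque(sorted(scoville)); merged = deque()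

-- ===== PRECONDITION & SPEC =====
-- Pre_ excludes only the empty list, on which A raises IndexError (heappop of an empty heap).
def Pre_solution (scoville : List Int) (K : Int) : Prop := scoville ≠ []
instance (scoville : List Int) (K : Int) : Decidable (Pre_solution scoville K) := by
  unfold Pre_solution; infer_instance
def pvWitness_solution : List Int × Int := ([1, 2, 3, 9, 10, 12], 7)

def Spec_solution (scoville : List Int) (K : Int) (out : Int) : Prop := out = solution_alt scoville K
instance (scoville : List Int) (K : Int) (out : Int) : Decidable (Spec_solution scoville K out) := by
  unfold Spec_solution; infer_instance

-- ===== CLAIM (what is proved, stated in full; the proofs are below) =====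
def Claim_equal_solution : Prop := ∀ (scoville : List Int) (K : Int), Dom_solution scoville K → Pre_solution scoville K → Spec_solution scoville K (solution scoville K)

-- ===== LEMMAS AND PROOFS =====

-- the loop invariant on the merged queue: any queue element a that is at least
-- the current second-minimum m2 is at most the next merged value m1 + 2*m2
def Cinv (o q : List Int) : Prop :=
  ∀ a ∈ q, ∀ m1 m2 : Int, (o ++ q).min? = some m1 →
    ((o ++ q).erase m1).min? = some m2 → m2 ≤ a → a ≤ m1 + 2 * m2

theorem min?_perm (l l' : List Int) (h : l.Perm l') : l.min? = l'.min? := by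
  cases hm : l'.min? with
  | none =>
    have : l' = [] := List.min?_eq_none_iff.mp hm
    subst this
    simpa using h.length_eq
  | some m =>
    rcases List.min?_eq_some_iff.mp hm with ⟨hmem, hle⟩
    exact List.min?_eq_some_iff.mpr ⟨h.mem_iff.mpr hmem, fun b hb => hle b (h.mem_iff.mp hb)⟩

-- popSmaller on sorted queues pops the minimum of the union, leaving sublists
theorem popSmaller_spec (o q : List Int) (ho : o.Pairwise (· ≤ ·))
    (hq : q.Pairwise (· ≤ ·)) (hne : ¬(o = [] ∧ q = [])) :
    (o ++ q).min? = some (popSmaller o q).1 ∧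
    (o ++ q).Perm ((popSmaller o q).1 :: ((popSmaller o q).2.1 ++ (popSmaller o q).2.2)) ∧
    (popSmaller o q).2.1.Sublist o ∧ (popSmaller o q).2.2.Sublist q := by
  match q, o with
  | [], [] => exact absurd ⟨rfl, rfl⟩ hne
  | x :: qt, [] =>
    rcases List.pairwise_cons.mp hq with ⟨hx, _⟩
    refine ⟨List.min?_eq_some_iff.mpr ⟨by simp [popSmaller], ?_⟩, by simp [popSmaller],
      by simp [popSmaller], by simp [popSmaller]⟩
    intro b hb
    rcases List.mem_cons.mp (by simpa [popSmaller] using hb) with rfl | hbt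
    · exact le_refl _
    · exact hx b hbt
  | [], y :: ot =>
    rcases List.pairwise_cons.mp ho with ⟨hy, _⟩
    refine ⟨List.min?_eq_some_iff.mpr ⟨by simp [popSmaller], ?_⟩, by simp [popSmaller],
      by simp [popSmaller], by simp [popSmaller]⟩
    intro b hb
    rcases List.mem_cons.mp (by simpa [popSmaller] using hb) with rfl | hbt
    · exact le_refl _
    · exact hy b hbt
  | x :: qt, y :: ot =>
    rcases List.pairwise_cons.mp hq with ⟨hx, hqt⟩
    rcases List.pairwise_cons.mp ho with ⟨hy, hot⟩
    simp only [popSmaller]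
    split
    · rename_i hxy
      refine ⟨List.min?_eq_some_iff.mpr ⟨by simp, ?_⟩, ?_, by simp, by simp⟩
      · intro b hb
        rcases List.mem_append.mp hb with hbo | hbq
        · rcases List.mem_cons.mp hbo with rfl | hbt
          · exact le_of_lt hxy
          · exact le_trans (le_of_lt hxy) (hy b hbt)
        · rcases List.mem_cons.mp hbq with rfl | hbt
          · exact le_refl _
          · exact hx b hbt
      · simpa using (List.perm_middle (l₁ := y :: ot) (l₂ := qt) (a := x))
    · rename_i hxy
      push_neg at hxy
      refine ⟨List.min?_eq_some_iff.mpr ⟨by simp, ?_⟩, by simp, by simp, by simp⟩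
      intro b hb
      rcases List.mem_append.mp hb with hbo | hbq
      · rcases List.mem_cons.mp hbo with rfl | hbt
        · exact le_refl _
        · exact hy b hbt
      · rcases List.mem_cons.mp hbq with rfl | hbt
        · exact hxy
        · exact le_trans hxy (hx b hbt)

-- preservation of Cinv across one merge step (the arithmetic heart of the proof)
theorem Cinv_preserved (m1 m2 : Int) (o2 q2 : List Int)
    (hm12 : m1 ≤ m2)
    (hge : ∀ x ∈ o2 ++ q2, m2 ≤ x)
    (hq2b : ∀ a ∈ q2, a ≤ m1 + 2 * m2) :
    Cinv o2 (q2 ++ [m1 + 2 * m2]) := by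
  intro a ha m1' m2' hm1' hm2' hle
  set b := m1 + 2 * m2 with hb
  have hU : o2 ++ (q2 ++ [b]) = (o2 ++ q2) ++ [b] := by simp
  -- a ≤ b
  have hab : a ≤ b := by
    rcases List.mem_append.mp ha with haq | hab
    · exact hq2b a haq
    · simp only [List.mem_singleton] at hab; omega
  -- characterisation of the two minima
  rcases List.min?_eq_some_iff.mp hm1' with ⟨hm1mem, hm1le⟩
  rcases List.min?_eq_some_iff.mp hm2' with ⟨hm2mem, hm2le⟩
  have hm2mem' : m2' ∈ o2 ++ (q2 ++ [b]) := List.mem_of_mem_erase hm2mem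
  -- every element of the new union is b or at least m2
  have helem : ∀ x ∈ o2 ++ (q2 ++ [b]), m2 ≤ x ∨ x = b := by
    intro x hx
    rw [hU] at hx
    rcases List.mem_append.mp hx with hx1 | hx2
    · exact Or.inl (hge x hx1)
    · simp only [List.mem_singleton] at hx2; exact Or.inr hx2
  -- m2 ≤ m2' always
  have hm2m2' : m2 ≤ m2' := by
    by_cases hbm : m2 ≤ b
    · rcases helem m2' hm2mem' with h | h
      · exact h
      · omega
    · -- b < m2: the minimum is b, and erasing it leaves o2 ++ q2
      push_neg at hbm
      have hm1b : m1' = b := by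
        have h1 : m1' ≤ b := hm1le b (by rw [hU]; simp)
        rcases helem m1' hm1mem with h | h
        · omega
        · exact h
      have hbno : b ∉ o2 := fun hc => absurd (hge b (List.mem_append.mpr (Or.inl hc))) (by omega)
      have hbnq : b ∉ q2 := fun hc => absurd (hge b (List.mem_append.mpr (Or.inr hc))) (by omega)
      have herase : (o2 ++ (q2 ++ [b])).erase m1' = o2 ++ q2 := by
        rw [hm1b, List.erase_append_right _ hbno, List.erase_append_right _ hbnq]
        simp
      rw [herase] at hm2mem
      exact hge m2' hm2mem
  by_cases hm2sign : 0 ≤ m2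
  · -- nonnegative second minimum
    by_cases hc : m2 ≤ m1'
    · omega
    · -- m1' < m2 forces m1' = b
      push_neg at hc
      have : m1' = b := by
        rcases helem m1' hm1mem with h | h
        · omega
        · exact h
      omega
  · -- m2 < 0: every queue element a would satisfy a ≤ b ≤ 3*m2 < m2 ≤ a or
    -- a = b with m2' ≤ b < m2 ≤ m2'; both are impossible
    push_neg at hm2sign
    rcases List.mem_append.mp ha with haq | hab'
    · have := hge a (List.mem_append.mpr (Or.inr haq))
      have := hq2b a haq
      omega
    · simp only [List.mem_singleton] at hab'
      omega

theorem go_eq (n : Nat) : ∀ (h o q : List Int) (K ans : Int), h.length ≤ n →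
    h.Perm (o ++ q) → o.Pairwise (· ≤ ·) → q.Pairwise (· ≤ ·) → Cinv o q →
    solutionGo h K ans = bGo o q K ans := by
  induction n with
  | zero =>
    intro h o q K ans hlen hperm _ _ _
    have hh : h = [] := List.length_eq_zero_iff.mp (Nat.le_zero.mp hlen)
    subst hh
    have : o ++ q = [] := List.length_eq_zero_iff.mp (by simpa using hperm.length_eq.symm)
    rcases List.append_eq_nil_iff.mp this with ⟨ho, hq⟩
    subst ho; subst hq
    rw [solutionGo.eq_def, bGo.eq_def]
    simp
  | succ n ih =>
    intro h o q K ans hlen hperm ho hq hC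
    by_cases he : o = [] ∧ q = []
    · rcases he with ⟨ho', hq'⟩
      subst ho'; subst hq'
      have hh : h = [] := List.length_eq_zero_iff.mp (by simpa using hperm.length_eq)
      subst hh
      rw [solutionGo.eq_def, bGo.eq_def]
      simp
    · rcases hps : popSmaller o q with ⟨m1, o1, q1⟩
      rcases popSmaller_spec o q ho hq he with ⟨hmin, hpm, hso, hsq⟩
      rw [hps] at hmin hpm hso hsq
      simp only at hmin hpm hso hsq
      have hh : h ≠ [] := by
        intro hc; subst hc
        have := hperm.length_eq
        simp only [List.length_nil, List.length_append] at this
        exact he ⟨List.length_eq_zero_iff.mp (by omega), List.length_eq_zero_iff.mp (by omega)⟩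
      have hhm : h.min? = some m1 := (min?_perm _ _ hperm).trans hmin
      rw [solutionGo.eq_def, bGo.eq_def]
      simp only [dif_neg hh, dif_neg he, hhm, Option.getD_some, hps]
      by_cases hK : m1 ≥ K
      · rw [if_pos hK, if_pos hK]
      · rw [if_neg hK, if_neg hK]
        -- erase the popped minimum
        have hperm1 : (h.erase m1).Perm (o1 ++ q1) := by
          have := (hperm.trans hpm).erase m1
          simpa [List.erase_cons_head] using this
        have ho1 : o1.Pairwise (· ≤ ·) := ho.sublist hso
        have hq1 : q1.Pairwise (· ≤ ·) := hq.sublist hsq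
        by_cases he1 : o1 = [] ∧ q1 = []
        · have h1nil : h.erase m1 = [] := by
            apply List.length_eq_zero_iff.mp
            rw [hperm1.length_eq, he1.1, he1.2]
            rfl
          rw [dif_pos h1nil, if_pos he1]
        · rcases hps2 : popSmaller o1 q1 with ⟨m2, o2, q2⟩
          rcases popSmaller_spec o1 q1 ho1 hq1 he1 with ⟨hmin2, hpm2, hso2, hsq2⟩
          rw [hps2] at hmin2 hpm2 hso2 hsq2
          simp only at hmin2 hpm2 hso2 hsq2
          have h1ne : h.erase m1 ≠ [] := by
            intro hc
            have := hperm1.length_eq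
            rw [hc] at this
            simp only [List.length_nil, List.length_append] at this
            exact he1 ⟨List.length_eq_zero_iff.mp (by omega), List.length_eq_zero_iff.mp (by omega)⟩
          have hh1m : (h.erase m1).min? = some m2 := (min?_perm _ _ hperm1).trans hmin2
          rw [dif_neg h1ne]
          simp only [hh1m, Option.getD_some, if_neg he1, hps2]
          -- facts for the invariant
          rcases List.min?_eq_some_iff.mp hmin with ⟨hm1mem', hm1le⟩
          rcases List.min?_eq_some_iff.mp hmin2 with ⟨hm2mem, hm2le⟩
          have hm12 : m1 ≤ m2 :=
            hm1le m2 (hpm.mem_iff.mpr (List.mem_cons_of_mem m1 hm2mem))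
          have hge : ∀ x ∈ o2 ++ q2, m2 ≤ x := by
            intro x hx
            exact hm2le x (hpm2.mem_iff.mpr (List.mem_cons_of_mem m2 hx))
          have hq2b : ∀ a ∈ q2, a ≤ m1 + 2 * m2 := by
            intro a haq
            have haq1 : a ∈ q1 := hsq2.mem haq
            have haq' : a ∈ q := hsq.mem haq1
            have herasemin : ((o ++ q).erase m1).min? = some m2 := by
              have hp : ((o ++ q).erase m1).Perm (o1 ++ q1) := by
                have := hpm.erase m1
                simpa [List.erase_cons_head] using this
              exact (min?_perm _ _ hp).trans hmin2
            exact hC a haq' m1 m2 hmin herasemin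
              (hm2le a (List.mem_append.mpr (Or.inr haq1)))
          apply ih
          · -- length bound
            have hm1mem : m1 ∈ h := (hperm.trans hpm).mem_iff.mpr (List.mem_cons_self ..)
            have e1 := List.length_erase_of_mem hm1mem
            have hm2mem' : m2 ∈ h.erase m1 :=
              (hperm1.trans hpm2).mem_iff.mpr (List.mem_cons_self ..)
            have e2 := List.length_erase_of_mem hm2mem'
            have hp : 0 < h.length := List.length_pos_of_ne_nil hh
            have hp1 : 0 < (h.erase m1).length := List.length_pos_of_ne_nil h1ne
            rw [e1] at hp1 e2
            simp only [List.length_append, List.length_cons, List.length_nil, e2]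
            omega
          · -- permutation
            have hperm2 : ((h.erase m1).erase m2).Perm (o2 ++ q2) := by
              have := (hperm1.trans hpm2).erase m2
              simpa [List.erase_cons_head] using this
            have := hperm2.append_right [m1 + 2 * m2]
            simpa using this
          · exact ho1.sublist hso2
          · -- sortedness of q2 ++ [b]
            refine List.pairwise_append.mpr ⟨hq1.sublist hsq2, by simp, ?_⟩
            intro a haq b hb
            simp only [List.mem_singleton] at hb
            subst hb
            exact hq2b a haq
          · exact Cinv_preserved m1 m2 o2 q2 hm12 hge hq2b

-- ===== VERDICT (by name: the statement is the Claim_ definition above) =====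
theorem solution_spec : Claim_equal_solution := by
  intro scoville K _ _
  unfold Spec_solution solution solution_alt
  apply go_eq scoville.length scoville _ [] K 0 (le_refl _)
  · simpa using (PySem.List.sorted_perm scoville (fun x => x) false).symm
  · simpa using PySem.List.sorted_pairwise scoville (fun x => x)
  · exact List.Pairwise.nil
  · intro a ha; simp at ha
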